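-- pv_equiv track=rewrite | github.com/6210qwe/leetcode_py | leetcode_solutions/by_id/q3992.py | longest_semi_repeating_subarray
-- ===== SOURCE A (Python) =====
-- from typing import List, Optional
--
-- def longest_semi_repeating_subarray(nums: List[int]) -> int:
--     """
--     函数式接口 - 找到最长的半重复子数组
--     """
--     if not nums:
--         return 0
--
--     left = 0
--     max_length = 0
--     count = {}
--
--     for right in range(len(nums)):
--         if nums[right] in count:
--             count[nums[right]] += 1
--         else:
--             count[nums[right]] = 1
--
--         while len([x for x in count.values() if x > 1]) > 1:
--             count[nums[left]] -= 1
--             if count[nums[left]] == 0: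
--                 del count[nums[left]]
--             left += 1
--
--         max_length = max(max_length, right - left + 1)
--
--     return max_length
-- ===== SOURCE B (Python) =====
-- from typing import List
--
-- def longest_semi_repeating_subarray(nums: List[int]) -> int:
--     # Different algorithm (no sliding window / no per-window counter):
--     # a value v is repeated inside a window [l, r] exactly when its
--     # second-to-last occurrence up to r is >= l.  So the best window ending
--     # at r is [m2 + 1, r], where m2 is the SECOND largest among the
--     # second-to-last occurrence indices of all values seen so far.  Those
--     # indices only grow, so it suffices to maintain the top two of them
--     # (value, index) in O(1) per element, using only a last-occurrence dict.
--     last = {}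
--     v1 = v2 = None          # values owning the two largest second-to-last occ.
--     m1 = m2 = -1            # their indices (-1 = absent)
--     best = 0
--     r = 0
--     for x in nums:
--         p = last.get(x)     # previous occurrence of x = its new 2nd-to-last occ.
--         last[x] = r
--         if p is not None:
--             if v1 == x:
--                 m1 = p
--             elif v2 == x:
--                 m2 = p
--                 if m2 > m1:
--                     v1, m1, v2, m2 = v2, m2, v1, m1
--             elif p > m1:
--                 v1, m1, v2, m2 = x, p, v1, m1
--             elif p > m2:
--                 v2, m2 = x, p
--         if r - m2 > best:
--             best = r - m2
--         r += 1
--     return best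
-- ===== Notes on version B (the rewrite author's own statement) =====
-- stated objective: faster
-- what changed: B drops A's sliding window with a per-window value counter entirely: it observes that the best window ending at r is [m2+1, r] where m2 is the second largest second-to-last-occurrence index among all values seen so far, and maintains just a last-occurrence dict plus the top two (value, index) pairs of those indices in O(1) per element; A instead keeps window counts and rescans all counter values at every while-test.
import Mathlib
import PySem

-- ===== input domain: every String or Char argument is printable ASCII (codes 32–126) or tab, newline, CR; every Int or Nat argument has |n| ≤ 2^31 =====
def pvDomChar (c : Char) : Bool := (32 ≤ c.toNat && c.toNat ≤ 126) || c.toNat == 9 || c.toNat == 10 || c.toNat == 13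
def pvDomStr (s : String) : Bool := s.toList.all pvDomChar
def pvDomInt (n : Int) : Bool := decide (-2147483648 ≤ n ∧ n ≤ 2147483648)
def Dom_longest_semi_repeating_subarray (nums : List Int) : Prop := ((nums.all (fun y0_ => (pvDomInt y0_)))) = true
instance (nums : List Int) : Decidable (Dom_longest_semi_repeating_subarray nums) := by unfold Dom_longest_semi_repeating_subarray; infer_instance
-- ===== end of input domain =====

-- B abandons A's sliding window with a per-window counter: it tracks, per element,
-- only the top two second-to-last-occurrence indices of the values seen so far
-- (they alone determine the best window ending at each position), using a
-- last-occurrence dict — O(1) work per element instead of A's rescan of the counter.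

-- ===== PORT A =====
-- the window nums[left:right+1] is carried as a list; its head is nums[left],
-- its length is right - left + 1
-- len([x for x in count.values() if x > 1])
def pvDupCount (d : PySem.Dict Int Int) : Nat :=
  (d.values.filter (fun x => decide (1 < x))).length

-- the `while` loop of A; the [] case is a totality guard (the window cannot be
-- empty while the condition holds)
def pvShrinkA : List Int → PySem.Dict Int Int → List Int × PySem.Dict Int Int
  | [], d => ([], d)
  | y :: rest, d =>
    if pvDupCount d > 1 then
      let c := d.getD y 0 - 1
      let d' := d.insert y c
      let d'' := if c = 0 then d'.erase y else d'
      pvShrinkA rest d''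
    else (y :: rest, d)

-- one iteration of A's `for` loop; state = (window, count, max_length)
def pvStepA (s : List Int × PySem.Dict Int Int × Int) (x : Int) :
    List Int × PySem.Dict Int Int × Int :=
  let d := if s.2.1.contains x then s.2.1.insert x (s.2.1.getD x 0 + 1)
           else s.2.1.insert x 1
  let wd := pvShrinkA (s.1 ++ [x]) d
  (wd.1, wd.2, max s.2.2 (wd.1.length : Int))

def longest_semi_repeating_subarray (nums : List Int) : Int :=
  if nums = [] then 0
  else (nums.foldl pvStepA ([], PySem.Dict.empty, 0)).2.2

-- ===== PORT B =====
-- the `if p is not None:` update of the two tracked (value, index) pairs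
def pvUpd (x : Int) (p? : Option Int) (v1 : Option Int) (m1 : Int) (v2 : Option Int) (m2 : Int) :
    Option Int × Int × Option Int × Int :=
  match p? with
  | none => (v1, m1, v2, m2)
  | some p =>
      if v1 = some x then (v1, p, v2, m2)
      else if v2 = some x then
        -- m2 = p; if m2 > m1: swap
        (if p > m1 then (v2, p, v1, m1) else (v1, m1, v2, p))
      else if p > m1 then (some x, p, v1, m1)
      else if p > m2 then (v1, m1, some x, p)
      else (v1, m1, v2, m2)

-- one iteration of B's `for` loop; state = (last, v1, m1, v2, m2, best, r)
def pvStepB (s : PySem.Dict Int Int × Option Int × Int × Option Int × Int × Int × Int) (x : Int) :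
    PySem.Dict Int Int × Option Int × Int × Option Int × Int × Int × Int :=
  let p? := s.1.get? x
  let t := pvUpd x p? s.2.1 s.2.2.1 s.2.2.2.1 s.2.2.2.2.1
  let cur := s.2.2.2.2.2.2 - t.2.2.2
  (s.1.insert x s.2.2.2.2.2.2, t.1, t.2.1, t.2.2.1, t.2.2.2,
   (if cur > s.2.2.2.2.2.1 then cur else s.2.2.2.2.2.1), s.2.2.2.2.2.2 + 1)

def longest_semi_repeating_subarray_alt (nums : List Int) : Int :=
  (nums.foldl pvStepB (PySem.Dict.empty, none, -1, none, -1, 0, 0)).2.2.2.2.2.1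

-- ===== PRECONDITION & SPEC =====
def Spec_longest_semi_repeating_subarray (nums : List Int) (out : Int) : Prop := out = longest_semi_repeating_subarray_alt nums
instance (nums : List Int) (out : Int) : Decidable (Spec_longest_semi_repeating_subarray nums out) := by unfold Spec_longest_semi_repeating_subarray; infer_instance

-- ===== CLAIM (what is proved, stated in full; the proofs are below) =====
def Claim_equal_longest_semi_repeating_subarray : Prop := ∀ (nums : List Int), Dom_longest_semi_repeating_subarray nums → Spec_longest_semi_repeating_subarray nums (longest_semi_repeating_subarray nums)

-- ===== LEMMAS AND PROOFS =====

-- `pvS P i`: index i is the second-to-last occurrence of its value in P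
def pvS (P : List Int) (i : Nat) : Prop :=
  i < P.length ∧ (P.drop (i+1)).count (P.getD i 0) = 1

-- invariant of B's top-two tracking after prefix P
def pvInvTop (P : List Int) (v1 : Option Int) (m1 : Int) (v2 : Option Int) (m2 : Int) : Prop :=
  -1 ≤ m2 ∧ m2 ≤ m1 ∧ (0 ≤ m2 → m2 < m1) ∧
  (∀ i : Nat, pvS P i → ((i : Int) = m1 ∨ (i : Int) ≤ m2)) ∧
  (0 ≤ m1 → ∃ i : Nat, (i : Int) = m1 ∧ pvS P i ∧ v1 = some (P.getD i 0)) ∧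
  (0 ≤ m2 → ∃ i : Nat, (i : Int) = m2 ∧ pvS P i ∧ v2 = some (P.getD i 0)) ∧
  (m1 < 0 → v1 = none) ∧ (m2 < 0 → v2 = none)

-- invariant of B's last-occurrence dict after prefix P
def pvLastInv (P : List Int) (d : PySem.Dict Int Int) : Prop :=
  (∀ v p, d.get? v = some p →
    ∃ i : Nat, (i : Int) = p ∧ i < P.length ∧ P.getD i 0 = v ∧ (P.drop (i+1)).count v = 0) ∧
  (∀ v, v ∈ P → d.get? v ≠ none)

-- the counter is exactly the multiset of the window (A's invariant)
def pvInv (win : List Int) (d : PySem.Dict Int Int) : Prop :=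
  d.keys.Nodup ∧
  ∀ v : Int, d.get? v = if 0 < win.count v then some ((win.count v : Int)) else none

theorem pvInv_getD {win : List Int} {d : PySem.Dict Int Int} (h : pvInv win d) (v : Int) :
    d.getD v 0 = (win.count v : Int) := by
  have hv := h.2 v
  simp only [PySem.Dict.getD, hv]
  by_cases hc : 0 < win.count v
  · simp [hc]
  · simp [hc]; omega

theorem pvDupCount_eq_countP (d : PySem.Dict Int Int) :
    pvDupCount d = d.items.countP (fun p => decide (1 < p.2)) := by
  simp [pvDupCount, PySem.Dict.values, ← List.countP_eq_length_filter, List.countP_map]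
  rfl

theorem pv_get?_erase (d : PySem.Dict Int Int) (x v : Int) :
    (d.erase x).get? v = if v = x then none else d.get? v := by
  simp only [PySem.Dict.get?, PySem.Dict.erase]
  induction d.items with
  | nil => simp
  | cons p rest ih =>
    by_cases hv : v = x <;> by_cases hp : p.1 = v <;> by_cases hx : p.1 = x <;>
      simp_all

theorem pv_nodup_keys_erase {d : PySem.Dict Int Int} (x : Int)
    (h : d.keys.Nodup) : (d.erase x).keys.Nodup := by
  have hs : ((d.items.filter (fun p => !(p.1 == x))).map Prod.fst).Sublist (d.items.map Prod.fst) :=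
    List.Sublist.map Prod.fst List.filter_sublist
  exact List.Nodup.sublist hs h

theorem pvInv_empty : pvInv [] PySem.Dict.empty := by
  constructor
  · simp [PySem.Dict.keys, PySem.Dict.empty]
  · intro v; simp [PySem.Dict.get?, PySem.Dict.empty]

-- pushing x onto the window
theorem pvInv_push {win : List Int} {d : PySem.Dict Int Int} (h : pvInv win d) (x : Int) :
    pvInv (win ++ [x]) (d.insert x (d.getD x 0 + 1)) := by
  rcases h with ⟨hnd, hg⟩
  have hgx := pvInv_getD ⟨hnd, hg⟩ x
  refine ⟨PySem.Dict.nodup_keys_insert _ _ _ hnd, ?_⟩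
  intro v
  rw [PySem.Dict.get?_insert]
  by_cases hv : v = x
  · subst hv
    simp [List.count_append, hgx]
  · rw [if_neg hv, hg v]
    simp [List.count_append, Ne.symm hv]

-- popping the head of the window
theorem pvInv_pop {y : Int} {rest : List Int} {d : PySem.Dict Int Int}
    (h : pvInv (y :: rest) d) :
    pvInv rest (if d.getD y 0 - 1 = 0 then (d.insert y (d.getD y 0 - 1)).erase y
                else d.insert y (d.getD y 0 - 1)) := by
  have hgy := pvInv_getD h y
  rcases h with ⟨hnd, hg⟩
  have hcy : (y :: rest).count y = rest.count y + 1 := by simp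
  have hgc : d.getD y 0 - 1 = ((rest.count y : Int)) := by
    rw [hgy, hcy]; push_cast; ring
  by_cases hz : d.getD y 0 - 1 = 0
  · rw [if_pos hz]
    have hr0 : rest.count y = 0 := by omega
    refine ⟨pv_nodup_keys_erase _ (PySem.Dict.nodup_keys_insert _ _ _ hnd), ?_⟩
    intro v
    rw [pv_get?_erase]
    by_cases hv : v = y
    · subst hv
      rw [if_pos rfl, hr0]
      simp
    · rw [if_neg hv, PySem.Dict.get?_insert, if_neg hv, hg v]
      simp [Ne.symm hv]
  · rw [if_neg hz]
    refine ⟨PySem.Dict.nodup_keys_insert _ _ _ hnd, ?_⟩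
    intro v
    rw [PySem.Dict.get?_insert]
    by_cases hv : v = y
    · subst hv
      have hpos : 0 < List.count v rest := by omega
      rw [if_pos rfl, if_pos hpos, hgc]
    · rw [if_neg hv, hg v]
      simp [Ne.symm hv]

-- ---------- list-index toolbox ----------

theorem pvDropCountMono (P : List Int) (v : Int) {l m : Nat} (h : l ≤ m) :
    (P.drop m).count v ≤ (P.drop l).count v := by
  have he : P.drop m = (P.drop l).drop (m - l) := by
    rw [List.drop_drop]; congr 1; omega
  rw [he]
  exact (List.drop_sublist _ _).count_le v

theorem pvDropCountSucc (P : List Int) {i : Nat} (h : i < P.length) :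
    (P.drop i).count (P.getD i 0) = (P.drop (i+1)).count (P.getD i 0) + 1 := by
  rw [List.drop_eq_getElem_cons h, List.count_cons, List.getD_eq_getElem P 0 h]
  simp

theorem pvCountPos (P : List Int) {i l : Nat} (hi : i < P.length) (hl : l ≤ i) :
    1 ≤ (P.drop l).count (P.getD i 0) := by
  have h1 := pvDropCountSucc P hi
  have h2 := pvDropCountMono P (P.getD i 0) hl
  omega

theorem pvCount_of_pvS (P : List Int) {l i : Nat} (h : pvS P i) (hl : l ≤ i) :
    2 ≤ (P.drop l).count (P.getD i 0) := by
  have h1 := pvDropCountSucc P h.1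
  have h2 := pvDropCountMono P (P.getD i 0) hl
  rw [h.2] at h1
  omega

theorem pvSecondLast_exists : ∀ (L : List Int) (v : Int), 2 ≤ L.count v →
    ∃ k, k < L.length ∧ L.getD k 0 = v ∧ (L.drop (k+1)).count v = 1 := by
  intro L
  induction L with
  | nil => intro v h; simp at h
  | cons a t ih =>
    intro v h
    rw [List.count_cons] at h
    simp only [beq_iff_eq] at h
    by_cases hav : a = v
    · rw [if_pos hav] at h
      by_cases h1 : t.count v = 1
      · exact ⟨0, by simp, by simpa using hav, by simpa using h1⟩
      · have h2 : 2 ≤ t.count v := by omega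
        obtain ⟨k, hk, hv, hc⟩ := ih v h2
        exact ⟨k+1, by simpa using hk, by simpa using hv, by simpa using hc⟩
    · rw [if_neg hav] at h
      have h2 : 2 ≤ t.count v := by omega
      obtain ⟨k, hk, hv, hc⟩ := ih v h2
      exact ⟨k+1, by simpa using hk, by simpa using hv, by simpa using hc⟩

theorem pvS_of_count (P : List Int) {l : Nat} {v : Int} (h : 2 ≤ (P.drop l).count v) :
    ∃ i, l ≤ i ∧ pvS P i ∧ P.getD i 0 = v := by
  obtain ⟨k, hk, hv, hc⟩ := pvSecondLast_exists (P.drop l) v h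
  rw [List.length_drop] at hk
  have hlen : l + k < P.length := by omega
  have hk' : k < (P.drop l).length := by rw [List.length_drop]; omega
  rw [List.getD_eq_getElem (P.drop l) 0 hk'] at hv
  simp only [List.getElem_drop] at hv
  have hval : P.getD (l + k) 0 = v := by rw [List.getD_eq_getElem P 0 hlen]; exact hv
  refine ⟨l + k, Nat.le_add_right _ _, ⟨hlen, ?_⟩, hval⟩
  rw [hval]
  rw [List.drop_drop] at hc
  have he : l + (k + 1) = l + k + 1 := by omega
  rw [he] at hc
  exact hc

theorem pvLast_ge {P : List Int} {i j : Nat} {x : Int} (hj : j < P.length)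
    (hjx : P.getD j 0 = x) (hi : i < P.length) (hix : P.getD i 0 = x)
    (hc : (P.drop (i+1)).count x = 0) : j ≤ i := by
  by_contra hlt
  push_neg at hlt
  have := pvCountPos P hj (by omega : i + 1 ≤ j)
  rw [hjx] at this
  omega

theorem pvS_inj {P : List Int} {i j : Nat} (hi : pvS P i) (hj : pvS P j)
    (hv : P.getD i 0 = P.getD j 0) : i = j := by
  rcases lt_trichotomy i j with h | h | h
  · exfalso
    have := pvCount_of_pvS P hj (by omega : i + 1 ≤ j)
    rw [← hv] at this
    rw [hi.2] at this
    omega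
  · exact h
  · exfalso
    have := pvCount_of_pvS P hi (by omega : j + 1 ≤ i)
    rw [hv] at this
    rw [hj.2] at this
    omega

theorem pvGetD_append {P : List Int} {x : Int} {i : Nat} (h : i < P.length) :
    (P ++ [x]).getD i 0 = P.getD i 0 := by
  rw [List.getD_eq_getElem _ 0 (by simp; omega), List.getD_eq_getElem _ 0 h,
    List.getElem_append_left h]

theorem pvDrop_append {P : List Int} {x : Int} {i : Nat} (h : i ≤ P.length) :
    (P ++ [x]).drop i = P.drop i ++ [x] :=
  List.drop_append_of_le_length h

theorem pvS_append_dom {P : List Int} {x : Int} {i : Nat} (h : pvS (P ++ [x]) i) :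
    i < P.length := by
  rcases h with ⟨hlen, hc⟩
  rw [List.length_append, List.length_singleton] at hlen
  rcases Nat.lt_or_ge i P.length with h | h
  · exact h
  · exfalso
    have hi : i = P.length := by omega
    subst hi
    rw [List.drop_eq_nil_of_le (by simp)] at hc
    simp at hc

theorem pvS_append_iff {P : List Int} {x : Int} {i : Nat} (h : i < P.length) :
    pvS (P ++ [x]) i ↔
      ((pvS P i ∧ P.getD i 0 ≠ x) ∨ (P.getD i 0 = x ∧ (P.drop (i+1)).count x = 0)) := by
  have hlen : i < (P ++ [x]).length := by simp; omega
  unfold pvS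
  rw [pvGetD_append h, pvDrop_append (by omega : i + 1 ≤ P.length), List.count_append]
  by_cases hx : P.getD i 0 = x
  · have hc1 : List.count (P.getD i 0) [x] = 1 := by rw [hx]; simp
    rw [hc1]
    constructor
    · rintro ⟨-, hc⟩
      rw [hx] at hc
      exact Or.inr ⟨hx, by omega⟩
    · rintro (⟨⟨-, hc⟩, hne⟩ | ⟨-, hc⟩)
      · exact absurd hx hne
      · refine ⟨hlen, ?_⟩
        rw [hx]
        omega
  · have hc0 : List.count (P.getD i 0) [x] = 0 := by
      rw [List.count_eq_zero]
      intro hm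
      rw [List.mem_singleton] at hm
      exact hx hm
    rw [hc0]
    constructor
    · rintro ⟨-, hc⟩
      exact Or.inl ⟨⟨h, by omega⟩, hx⟩
    · rintro (⟨⟨-, hc⟩, -⟩ | ⟨he, -⟩)
      · exact ⟨hlen, by omega⟩
      · exact absurd he hx

theorem pvS_append_keep {P : List Int} {x : Int} {i : Nat} (h : pvS P i)
    (hne : P.getD i 0 ≠ x) : pvS (P ++ [x]) i :=
  (pvS_append_iff h.1).mpr (Or.inl ⟨h, hne⟩)

-- ---------- dup-count bridge ----------

theorem pv_two_mem_length {α : Type} {L : List α} {a b : α} (ha : a ∈ L) (hb : b ∈ L)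
    (hne : a ≠ b) : 1 < L.length := by
  match L, ha, hb with
  | [c], ha, hb =>
    rw [List.mem_singleton] at ha hb
    exact absurd (ha.trans hb.symm) hne
  | c :: d :: t, _, _ => simp

theorem pvDup_two {win : List Int} {d : PySem.Dict Int Int} (h : pvInv win d) :
    1 < pvDupCount d ↔ ∃ v w : Int, v ≠ w ∧ 2 ≤ win.count v ∧ 2 ≤ win.count w := by
  have hkeys : (d.items.map Prod.fst).Nodup := h.1
  constructor
  · intro hd
    rw [pvDupCount_eq_countP, List.countP_eq_length_filter] at hd
    have hndF : ((d.items.filter (fun p => decide (1 < p.2))).map Prod.fst).Nodup :=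
      hkeys.sublist (List.Sublist.map Prod.fst List.filter_sublist)
    obtain ⟨a, b, t, hFeq⟩ : ∃ a b t,
        d.items.filter (fun p => decide (1 < p.2)) = a :: b :: t := by
      rcases hF : d.items.filter (fun p => decide (1 < p.2)) with _ | ⟨a, _ | ⟨b, t⟩⟩
      · rw [hF] at hd; simp at hd
      · rw [hF] at hd; simp at hd
      · exact ⟨a, b, t, hF⟩
    have haF : a ∈ d.items.filter (fun p => decide (1 < p.2)) := by rw [hFeq]; simp
    have hbF : b ∈ d.items.filter (fun p => decide (1 < p.2)) := by rw [hFeq]; simp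
    have hab : a.1 ≠ b.1 := by
      rw [hFeq] at hndF
      simp only [List.map_cons, List.nodup_cons, List.mem_cons] at hndF
      exact fun he => hndF.1 (Or.inl he)
    have hcount : ∀ q ∈ d.items.filter (fun p => decide (1 < p.2)), 2 ≤ win.count q.1 := by
      intro q hq
      rw [List.mem_filter] at hq
      have hq1 : (q.1, q.2) ∈ d.items := by simpa using hq.1
      have hg : d.get? q.1 = some q.2 := PySem.Dict.get?_of_mem_items d hq1 h.1
      have hg2 := h.2 q.1
      rw [hg] at hg2
      by_cases hc : 0 < win.count q.1
      · rw [if_pos hc] at hg2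
        have hq2 : (1 : Int) < q.2 := by simpa using hq.2
        have : q.2 = (win.count q.1 : Int) := by exact Option.some.inj hg2
        omega
      · rw [if_neg hc] at hg2
        exact absurd hg2 (by simp)
    exact ⟨a.1, b.1, hab, hcount a haF, hcount b hbF⟩
  · rintro ⟨v, w, hvw, hv, hw⟩
    have hmemF : ∀ u : Int, 2 ≤ win.count u →
        (u, (win.count u : Int)) ∈ d.items.filter (fun p => decide (1 < p.2)) := by
      intro u hu
      have hg : d.get? u = some ((win.count u : Int)) := by
        rw [h.2 u, if_pos (by omega)]
      rw [List.mem_filter]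
      exact ⟨(PySem.Dict.get?_eq_some_iff_mem_items d u _ h.1).mp hg, by
        simp only [decide_eq_true_eq]; exact_mod_cast (by omega : (1:Nat) < win.count u)⟩
    have h1 := hmemF v hv
    have h2 := hmemF w hw
    have hne : (v, (win.count v : Int)) ≠ (w, (win.count w : Int)) := by
      intro he
      exact hvw (congrArg Prod.fst he)
    rw [pvDupCount_eq_countP, List.countP_eq_length_filter]
    exact pv_two_mem_length h1 h2 hne

-- ---------- invariant transport ----------

theorem pvM2_lt {P : List Int} {v1 : Option Int} {m1 : Int} {v2 : Option Int} {m2 : Int}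
    (h : pvInvTop P v1 m1 v2 m2) : m2 < (P.length : Int) := by
  by_cases hm : 0 ≤ m2
  · obtain ⟨i, hi, hS, -⟩ := h.2.2.2.2.2.1 hm
    rw [← hi]
    exact_mod_cast hS.1
  · have : (0 : Int) ≤ (P.length : Int) := by positivity
    omega

theorem pvWitness_keep {P : List Int} {x : Int} {m : Int} {v : Option Int}
    (hw : 0 ≤ m → ∃ i : Nat, (i : Int) = m ∧ pvS P i ∧ v = some (P.getD i 0))
    (hne : v ≠ some x) :
    0 ≤ m → ∃ i : Nat, (i : Int) = m ∧ pvS (P ++ [x]) i ∧ v = some ((P ++ [x]).getD i 0) := by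
  intro hm
  obtain ⟨i, h1, h2, h3⟩ := hw hm
  have hvx : P.getD i 0 ≠ x := fun hh => hne (by rw [h3, hh])
  refine ⟨i, h1, pvS_append_keep h2 hvx, ?_⟩
  rw [pvGetD_append h2.1]
  exact h3

theorem pvUpd_inv (P : List Int) (x : Int) (v1 : Option Int) (m1 : Int) (v2 : Option Int)
    (m2 : Int) (p? : Option Int) (hT : pvInvTop P v1 m1 v2 m2)
    (hsome : ∀ p : Int, p? = some p →
      ∃ i : Nat, (i : Int) = p ∧ i < P.length ∧ P.getD i 0 = x ∧ (P.drop (i+1)).count x = 0)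
    (hnone : p? = none → ∀ i : Nat, i < P.length → P.getD i 0 ≠ x) :
    pvInvTop (P ++ [x]) (pvUpd x p? v1 m1 v2 m2).1 (pvUpd x p? v1 m1 v2 m2).2.1
      (pvUpd x p? v1 m1 v2 m2).2.2.1 (pvUpd x p? v1 m1 v2 m2).2.2.2
    ∧ m2 ≤ (pvUpd x p? v1 m1 v2 m2).2.2.2 := by
  obtain ⟨h1n, h21, h3s, htop, hw1, hw2, hv1n, hv2n⟩ := hT
  cases p? with
  | none =>
    have hiff : ∀ i : Nat, pvS (P ++ [x]) i ↔ pvS P i := by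
      intro i
      constructor
      · intro hs
        have hd := pvS_append_dom hs
        rcases (pvS_append_iff hd).mp hs with ⟨hh, -⟩ | ⟨hx, -⟩
        · exact hh
        · exact absurd hx (hnone rfl i hd)
      · intro hs
        exact pvS_append_keep hs (hnone rfl i hs.1)
    simp only [pvUpd]
    refine ⟨⟨ h1n, h21, h3s, ?_, ?_, ?_, hv1n, hv2n⟩, le_refl _⟩
    · intro i hs
      exact htop i ((hiff i).mp hs)
    · intro hm
      obtain ⟨i, a, b, c⟩ := hw1 hm
      exact ⟨i, a, (hiff i).mpr b, by rw [pvGetD_append b.1]; exact c⟩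
    · intro hm
      obtain ⟨i, a, b, c⟩ := hw2 hm
      exact ⟨i, a, (hiff i).mpr b, by rw [pvGetD_append b.1]; exact c⟩
  | some p =>
    obtain ⟨i0, hi0p, hi0len, hi0x, hi0c⟩ := hsome p rfl
    have hp0 : 0 ≤ p := by rw [← hi0p]; positivity
    have hSnew : pvS (P ++ [x]) i0 := (pvS_append_iff hi0len).mpr (Or.inr ⟨hi0x, hi0c⟩)
    have hvalnew : (P ++ [x]).getD i0 0 = x := by rw [pvGetD_append hi0len]; exact hi0x
    have hSx_lt : ∀ j : Nat, pvS P j → P.getD j 0 = x → (j : Int) < p := by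
      intro j hj hjx
      have hle : j ≤ i0 := pvLast_ge hj.1 hjx hi0len hi0x hi0c
      have hne : j ≠ i0 := by
        intro he
        have h2 := hj.2
        rw [he, hi0x, hi0c] at h2
        exact absurd h2 (by omega)
      omega
    have hchar : ∀ i : Nat, pvS (P ++ [x]) i → i = i0 ∨ (pvS P i ∧ P.getD i 0 ≠ x) := by
      intro i hs
      have hd := pvS_append_dom hs
      rcases (pvS_append_iff hd).mp hs with hh | ⟨ha, hb⟩
      · exact Or.inr hh
      · left
        have hle1 : i ≤ i0 := pvLast_ge hd ha hi0len hi0x hi0c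
        have hle2 : i0 ≤ i := pvLast_ge hi0len hi0x hd ha hb
        omega
    have hV1 : v1 = some x → ∃ i1 : Nat, (i1 : Int) = m1 ∧ pvS P i1 ∧ P.getD i1 0 = x ∧ m1 < p := by
      intro hvx
      have hm1 : 0 ≤ m1 := by
        by_contra hc
        push_neg at hc
        rw [hv1n hc] at hvx
        simp at hvx
      obtain ⟨i1, ha, hb, hc⟩ := hw1 hm1
      have hx1 : P.getD i1 0 = x := by
        rw [hvx] at hc
        exact (Option.some.inj hc).symm
      have := hSx_lt i1 hb hx1
      exact ⟨i1, ha, hb, hx1, by omega⟩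
    have hV2 : v2 = some x → ∃ j2 : Nat, (j2 : Int) = m2 ∧ pvS P j2 ∧ P.getD j2 0 = x ∧ m2 < p := by
      intro hvx
      have hm2 : 0 ≤ m2 := by
        by_contra hc
        push_neg at hc
        rw [hv2n hc] at hvx
        simp at hvx
      obtain ⟨j2, ha, hb, hc⟩ := hw2 hm2
      have hx2 : P.getD j2 0 = x := by
        rw [hvx] at hc
        exact (Option.some.inj hc).symm
      have := hSx_lt j2 hb hx2
      exact ⟨j2, ha, hb, hx2, by omega⟩
    have hpm1 : v1 ≠ some x → 0 ≤ m1 → p ≠ m1 := by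
      intro hne hm1 hpe
      obtain ⟨i1, ha, hb, hc⟩ := hw1 hm1
      have hii : i1 = i0 := by
        have : (i1 : Int) = (i0 : Int) := by omega
        exact_mod_cast this
      rw [hii, hi0x] at hc
      exact hne hc
    have hpm2 : v2 ≠ some x → 0 ≤ m2 → p ≠ m2 := by
      intro hne hm2 hpe
      obtain ⟨j2, ha, hb, hc⟩ := hw2 hm2
      have hjj : j2 = i0 := by
        have : (j2 : Int) = (i0 : Int) := by omega
        exact_mod_cast this
      rw [hjj, hi0x] at hc
      exact hne hc
    simp only [pvUpd]
    by_cases hbv1 : v1 = some x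
    · rw [if_pos hbv1]
      obtain ⟨i1, ha1, hb1, hx1, hm1p⟩ := hV1 hbv1
      dsimp only
      refine ⟨⟨ h1n, by omega, by intro _; omega, ?_, ?_, ?_, ?_, hv2n⟩, le_refl _⟩
      · intro i hs
        rcases hchar i hs with he | ⟨hsi, hnei⟩
        · subst he; exact Or.inl hi0p
        · rcases htop i hsi with he1 | hle
          · exfalso
            have hii : i = i1 := by
              have : (i : Int) = (i1 : Int) := by omega
              exact_mod_cast this
            rw [hii] at hnei
            exact hnei hx1
          · exact Or.inr hle
      · intro _
        exact ⟨i0, hi0p, hSnew, by rw [hvalnew]; exact hbv1⟩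
      · intro hm
        have hvne : v2 ≠ some x := by
          intro hvx
          obtain ⟨j2, hb, hc, hdx, -⟩ := hV2 hvx
          have hji : j2 = i1 := pvS_inj hc hb1 (by rw [hdx, hx1])
          have := h3s hm
          omega
        exact pvWitness_keep hw2 hvne hm
      · intro hc
        exact absurd hp0 (by omega)
    · rw [if_neg hbv1]
      by_cases hbv2 : v2 = some x
      · rw [if_pos hbv2]
        obtain ⟨j2, ha2, hb2, hx2, hm2p⟩ := hV2 hbv2
        have hm2 : 0 ≤ m2 := by
          by_contra hc
          push_neg at hc
          rw [hv2n hc] at hbv2; simp at hbv2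
        have hstrict : m2 < m1 := h3s hm2
        have hm1 : 0 ≤ m1 := by omega
        by_cases hgt : p > m1
        · rw [if_pos hgt]
          dsimp only
          refine ⟨⟨ by omega, by omega, by intro _; omega, ?_, ?_, ?_, ?_, ?_⟩, by omega⟩
          · intro i hs
            rcases hchar i hs with he | ⟨hsi, hnei⟩
            · subst he; exact Or.inl hi0p
            · rcases htop i hsi with he1 | hle
              · exact Or.inr (by omega)
              · exact Or.inr (by omega)
          · intro _
            exact ⟨i0, hi0p, hSnew, by rw [hvalnew]; exact hbv2⟩
          · intro _
            exact pvWitness_keep hw1 hbv1 hm1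
          · intro hc
            exact absurd hp0 (by omega)
          · intro hc
            exact absurd hm1 (by omega)
        · rw [if_neg hgt]
          have hplt : p < m1 := by
            have := hpm1 hbv1 hm1
            omega
          dsimp only
          refine ⟨⟨ by omega, by omega, by intro _; omega, ?_, ?_, ?_, hv1n, ?_⟩, by omega⟩
          · intro i hs
            rcases hchar i hs with he | ⟨hsi, hnei⟩
            · subst he; exact Or.inr (by omega)
            · rcases htop i hsi with he1 | hle
              · exact Or.inl he1
              · exact Or.inr (by omega)
          · intro _
            exact pvWitness_keep hw1 hbv1 hm1
          · intro _
            exact ⟨i0, hi0p, hSnew, by rw [hvalnew]; exact hbv2⟩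
          · intro hc
            exact absurd hp0 (by omega)
      · rw [if_neg hbv2]
        by_cases hgt : p > m1
        · rw [if_pos hgt]
          dsimp only
          refine ⟨⟨ by omega, by omega, by intro _; omega, ?_, ?_, ?_, ?_, hv1n⟩, by omega⟩
          · intro i hs
            rcases hchar i hs with he | ⟨hsi, hnei⟩
            · subst he; exact Or.inl hi0p
            · rcases htop i hsi with he1 | hle
              · exact Or.inr (by omega)
              · exact Or.inr (by omega)
          · intro _
            exact ⟨i0, hi0p, hSnew, by rw [hvalnew]⟩
          · intro hm
            exact pvWitness_keep hw1 hbv1 hm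
          · intro hc
            exact absurd hp0 (by omega)
        · rw [if_neg hgt]
          by_cases hgt2 : p > m2
          · rw [if_pos hgt2]
            have hm1 : 0 ≤ m1 := by omega
            have hplt : p < m1 := by
              have := hpm1 hbv1 hm1
              omega
            dsimp only
            refine ⟨⟨ by omega, by omega, by intro _; omega, ?_, ?_, ?_, hv1n, ?_⟩, by omega⟩
            · intro i hs
              rcases hchar i hs with he | ⟨hsi, hnei⟩
              · subst he; exact Or.inr (by omega)
              · rcases htop i hsi with he1 | hle
                · exact Or.inl he1
                · exact Or.inr (by omega)
            · intro _
              exact pvWitness_keep hw1 hbv1 hm1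
            · intro _
              exact ⟨i0, hi0p, hSnew, by rw [hvalnew]⟩
            · intro hc
              exact absurd hp0 (by omega)
          · rw [if_neg hgt2]
            dsimp only
            refine ⟨⟨ h1n, h21, h3s, ?_, ?_, ?_, hv1n, hv2n⟩, le_refl _⟩
            · intro i hs
              rcases hchar i hs with he | ⟨hsi, hnei⟩
              · subst he; exact Or.inr (by omega)
              · exact htop i hsi
            · intro hm
              exact pvWitness_keep hw1 hbv1 hm
            · intro hm
              exact pvWitness_keep hw2 hbv2 hm

theorem pvLastInv_step {P : List Int} {x : Int} {d : PySem.Dict Int Int}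
    (h : pvLastInv P d) : pvLastInv (P ++ [x]) (d.insert x (P.length : Int)) := by
  constructor
  · intro v p hp
    rw [PySem.Dict.get?_insert] at hp
    by_cases hv : v = x
    · rw [if_pos hv] at hp
      have hplen : p = (P.length : Int) := by exact Option.some.inj hp |>.symm
      refine ⟨P.length, by omega, by simp, ?_, ?_⟩
      · subst hv
        rw [List.getD_eq_getElem _ 0 (by simp)]
        simp
      · rw [List.drop_eq_nil_of_le (by simp)]
        simp
    · rw [if_neg hv] at hp
      obtain ⟨i, h1, h2, h3, h4⟩ := h.1 v p hp
      refine ⟨i, h1, by simp; omega, ?_, ?_⟩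
      · rw [pvGetD_append h2]; exact h3
      · rw [pvDrop_append (by omega : i + 1 ≤ P.length), List.count_append, h4]
        have hz : List.count v [x] = 0 := by
          rw [List.count_eq_zero]
          intro hm
          rw [List.mem_singleton] at hm
          exact hv hm
        omega
  · intro v hv
    rw [PySem.Dict.get?_insert]
    by_cases hx : v = x
    · rw [if_pos hx]; simp
    · rw [if_neg hx]
      rw [List.mem_append, List.mem_singleton] at hv
      exact h.2 v (hv.resolve_right hx)

-- ---------- the shrink loop ----------

theorem pvShrinkRun (P' : List Int) (v1 : Option Int) (m1 : Int) (v2 : Option Int) (m2 : Int)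
    (hT : pvInvTop P' v1 m1 v2 m2) :
    ∀ (n l : Nat) (d : PySem.Dict Int Int), (m2+1).toNat = l + n → pvInv (P'.drop l) d →
      ∃ d', pvShrinkA (P'.drop l) d = (P'.drop ((m2+1).toNat), d')
            ∧ pvInv (P'.drop ((m2+1).toNat)) d' := by
  have hm2n : -1 ≤ m2 := hT.1
  have hcast : (((m2+1).toNat : Nat) : Int) = m2 + 1 := Int.toNat_of_nonneg (by omega)
  intro n
  induction n with
  | zero =>
    intro l d hln hinv
    have hl : l = (m2+1).toNat := by omega
    subst hl
    have hdup : ¬ 1 < pvDupCount d := by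
      intro hd
      obtain ⟨v, w, hvw, hv, hw⟩ := (pvDup_two hinv).mp hd
      obtain ⟨i, hiL, hiS, hiv⟩ := pvS_of_count P' hv
      obtain ⟨j, hjL, hjS, hjv⟩ := pvS_of_count P' hw
      have hij : i ≠ j := fun he => hvw (by rw [← hiv, ← hjv, he])
      have hi2 := hT.2.2.2.1 i hiS
      have hj2 := hT.2.2.2.1 j hjS
      have hiI : ((m2+1).toNat : Int) ≤ (i : Int) := by exact_mod_cast hiL
      have hjI : ((m2+1).toNat : Int) ≤ (j : Int) := by exact_mod_cast hjL
      have : (i : Int) = (j : Int) := by omega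
      exact hij (by exact_mod_cast this)
    refine ⟨d, ?_, hinv⟩
    rcases hD : P'.drop ((m2+1).toNat) with _ | ⟨y, rest⟩
    · rfl
    · simp [pvShrinkA, hdup]
  | succ n ih =>
    intro l d hln hinv
    have hm2 : 0 ≤ m2 := by omega
    obtain ⟨j2, hj2, hj2S, -⟩ := hT.2.2.2.2.2.1 hm2
    have hm1 : 0 ≤ m1 := le_trans hm2 hT.2.1
    obtain ⟨i1, hi1, hi1S, -⟩ := hT.2.2.2.2.1 hm1
    have hlt : m2 < m1 := hT.2.2.1 hm2
    have hij : i1 ≠ j2 := by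
      intro he
      rw [he, hj2] at hi1
      omega
    have hvne : P'.getD i1 0 ≠ P'.getD j2 0 := fun he => hij (pvS_inj hi1S hj2S he)
    have hdup : 1 < pvDupCount d :=
      (pvDup_two hinv).mpr ⟨P'.getD i1 0, P'.getD j2 0, hvne,
        pvCount_of_pvS P' hi1S (by omega), pvCount_of_pvS P' hj2S (by omega)⟩
    have hjlen : j2 < P'.length := hj2S.1
    have hllen : l < P'.length := by omega
    have hcons : P'.drop l = P'[l] :: P'.drop (l+1) := List.drop_eq_getElem_cons hllen
    have hinv' : pvInv (P'[l] :: P'.drop (l+1)) d := by rw [← hcons]; exact hinv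
    have hpop := pvInv_pop hinv'
    obtain ⟨d', hrun, hfin⟩ := ih (l+1) _ (by omega) hpop
    refine ⟨d', ?_, hfin⟩
    rw [hcons]
    simp only [pvShrinkA, if_pos hdup]
    exact hrun

-- ---------- the main fold ----------

theorem pvFoldRel : ∀ (rest P : List Int) (d last : PySem.Dict Int Int) (v1 : Option Int)
    (m1 : Int) (v2 : Option Int) (m2 : Int) (mx : Int),
    pvInv (P.drop ((m2+1).toNat)) d → pvLastInv P last → pvInvTop P v1 m1 v2 m2 →
    (rest.foldl pvStepA (P.drop ((m2+1).toNat), d, mx)).2.2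
      = (rest.foldl pvStepB (last, v1, m1, v2, m2, mx, (P.length : Int))).2.2.2.2.2.1 := by
  intro rest
  induction rest with
  | nil => intros; rfl
  | cons x rest ih =>
    intro P d last v1 m1 v2 m2 mx hA hL hT
    have hm2len : m2 < (P.length : Int) := pvM2_lt hT
    have hm2n : -1 ≤ m2 := hT.1
    have hcast : (((m2+1).toNat : Nat) : Int) = m2 + 1 := Int.toNat_of_nonneg (by omega)
    have hlle : (m2+1).toNat ≤ P.length := by omega
    have hsome : ∀ p : Int, last.get? x = some p →
        ∃ i : Nat, (i : Int) = p ∧ i < P.length ∧ P.getD i 0 = x ∧ (P.drop (i+1)).count x = 0 :=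
      fun p hp => hL.1 x p hp
    have hnone : last.get? x = none → ∀ i : Nat, i < P.length → P.getD i 0 ≠ x := by
      intro hn i hi hx
      have hmem : P.getD i 0 ∈ P := by
        rw [List.getD_eq_getElem _ 0 hi]
        exact List.getElem_mem _
      rw [hx] at hmem
      exact hL.2 x hmem hn
    obtain ⟨hT', hmono⟩ := pvUpd_inv P x v1 m1 v2 m2 (last.get? x) hT hsome hnone
    rcases hU : pvUpd x (last.get? x) v1 m1 v2 m2 with ⟨w1, n1, w2, n2⟩
    rw [hU] at hT' hmono
    dsimp only at hT' hmono
    have hn2len : n2 < ((P ++ [x]).length : Int) := pvM2_lt hT'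
    have hn2n : -1 ≤ n2 := hT'.1
    have hcast' : (((n2+1).toNat : Nat) : Int) = n2 + 1 := Int.toNat_of_nonneg (by omega)
    have hdict : (if d.contains x then d.insert x (d.getD x 0 + 1) else d.insert x 1)
        = d.insert x (d.getD x 0 + 1) := by
      by_cases hc : d.contains x
      · rw [if_pos hc]
      · rw [if_neg hc, PySem.Dict.getD_of_not_contains _ _ (by simpa using hc)]
        norm_num
    have hpush : pvInv ((P ++ [x]).drop ((m2+1).toNat)) (d.insert x (d.getD x 0 + 1)) := by
      rw [pvDrop_append hlle]
      exact pvInv_push hA x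
    obtain ⟨d2, hrun, hinv2⟩ := pvShrinkRun (P ++ [x]) w1 n1 w2 n2 hT'
      ((n2+1).toNat - (m2+1).toNat) ((m2+1).toNat) (d.insert x (d.getD x 0 + 1))
      (by omega) hpush
    have hstepA : pvStepA (P.drop ((m2+1).toNat), d, mx) x
        = ((P ++ [x]).drop ((n2+1).toNat), d2,
            max mx ((((P ++ [x]).drop ((n2+1).toNat)).length : Nat) : Int)) := by
      simp only [pvStepA]
      rw [hdict, ← pvDrop_append hlle, hrun]
    have hB : pvStepB (last, v1, m1, v2, m2, mx, (P.length : Int)) x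
        = (last.insert x (P.length : Int), w1, n1, w2, n2,
           (if (P.length : Int) - n2 > mx then (P.length : Int) - n2 else mx),
           (P.length : Int) + 1) := by
      simp only [pvStepB]
      rw [hU]
    have hle' : (n2+1).toNat ≤ (P ++ [x]).length := Int.toNat_le.mpr (by omega)
    have hwin : ((((P ++ [x]).drop ((n2+1).toNat)).length : Nat) : Int) = (P.length : Int) - n2 := by
      rw [List.length_drop, Nat.cast_sub hle', hcast']
      push_cast [List.length_append, List.length_singleton]
      omega
    have hmax : max mx ((((P ++ [x]).drop ((n2+1).toNat)).length : Nat) : Int)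
        = (if (P.length : Int) - n2 > mx then (P.length : Int) - n2 else mx) := by
      rw [hwin, max_def]
      split_ifs <;> omega
    have hr : ((P.length : Int) + 1) = (((P ++ [x]).length : Nat) : Int) := by
      push_cast [List.length_append, List.length_singleton]
      ring
    have hrec := ih (P ++ [x]) d2 (last.insert x (P.length : Int)) w1 n1 w2 n2
      (max mx ((((P ++ [x]).drop ((n2+1).toNat)).length : Nat) : Int))
      hinv2 (pvLastInv_step hL) hT'
    rw [List.foldl_cons, List.foldl_cons, hstepA, hB, ← hmax, ← hr] at *
    exact hrec

-- ===== VERDICT (by name: the statement is the Claim_ definition above) =====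
theorem longest_semi_repeating_subarray_spec : Claim_equal_longest_semi_repeating_subarray := by
  intro nums _
  unfold Spec_longest_semi_repeating_subarray
  unfold longest_semi_repeating_subarray longest_semi_repeating_subarray_alt
  by_cases h : nums = []
  · subst h; rfl
  · rw [if_neg h]
    have hT : pvInvTop [] none (-1) none (-1) := by
      refine ⟨by norm_num, le_refl _, by norm_num, ?_, by norm_num, by norm_num, fun _ => rfl, fun _ => rfl⟩
      intro i hS; exact absurd hS.1 (by simp)
    have hL : pvLastInv [] PySem.Dict.empty := by
      constructor
      · intro v p hp; simp [PySem.Dict.get?, PySem.Dict.empty] at hp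
      · intro v hv; simp at hv
    have := pvFoldRel nums [] PySem.Dict.empty PySem.Dict.empty none (-1) none (-1) 0
      (by simpa using pvInv_empty) hL hT
    simpa using this
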